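-- pv_equiv track=rewrite | github.com/johndpope/WaterIsland_RiskPortal | notes/views.py | get_cleaned_ticker_string
-- ===== SOURCE A (Python) =====
-- def get_cleaned_ticker_string(selected_ticker, other_ticker):
--     selected_ticker = [ticker.strip().upper() for ticker in selected_ticker.split(",") if ticker.strip()]
--     other_ticker = [ticker.strip().upper() for ticker in other_ticker.split(",") if ticker.strip()]
--     for index, ticker in enumerate(other_ticker):
--         ticker = ticker.strip()
--         ticker_split = ticker.split(' ')
--         ticker_split = [item.strip() for item in ticker_split]
--         if len(ticker_split) == 1:
--             ticker = ticker.upper() + ' US'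
--             other_ticker[index] = ticker
--     ticker_list = selected_ticker + other_ticker
--     tickers = ", ".join(str(ticker) for ticker in ticker_list)
--     return tickers
-- ===== SOURCE B (Python) =====
-- def get_cleaned_ticker_string(selected_ticker, other_ticker):
--     # One character-level scan per input string: tokens, stripping, uppercasing and
--     # the ' US' suffix are all produced by a single state machine, with no
--     # split()/strip()/upper() passes over intermediate lists.
--     out = []
--     for s, suffix in ((selected_ticker, False), (other_ticker, True)):
--         token, pending = '', ''
--         for c in s + ',':          # sentinel comma flushes the final token
--             if c == ',':
--                 if token:
--                     out.append(token + ' US' if suffix and ' ' not in token else token)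
--                 token, pending = '', ''
--             elif c.isspace():
--                 if token:          # leading whitespace is never buffered
--                     pending += c
--             else:
--                 token += pending + c.upper()   # internal whitespace gets flushed in
--                 pending = ''
--     return ', '.join(out)
-- ===== Notes on version B (the rewrite author's own statement) =====
-- stated objective: alternative
-- what changed: Replaces A's split/strip/upper list passes plus a second rescan-and-mutate loop with a single character-level state machine per input string that builds each cleaned token (stripping, uppercasing, empty-token filtering and the conditional ' US' suffix) in one scan.
import Mathlib
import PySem

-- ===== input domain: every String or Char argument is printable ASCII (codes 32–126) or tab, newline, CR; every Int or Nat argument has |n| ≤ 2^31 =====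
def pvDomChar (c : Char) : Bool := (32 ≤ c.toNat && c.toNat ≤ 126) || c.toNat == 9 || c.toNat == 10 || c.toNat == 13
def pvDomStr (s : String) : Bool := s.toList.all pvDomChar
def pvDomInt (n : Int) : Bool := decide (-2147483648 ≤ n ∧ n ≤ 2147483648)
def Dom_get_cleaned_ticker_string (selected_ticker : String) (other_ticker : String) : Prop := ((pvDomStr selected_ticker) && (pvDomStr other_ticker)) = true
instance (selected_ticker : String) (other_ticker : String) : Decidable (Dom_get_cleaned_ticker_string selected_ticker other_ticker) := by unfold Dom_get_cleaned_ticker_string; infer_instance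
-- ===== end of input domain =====

-- B replaces A's split/strip/upper passes and the rescan-and-mutate loop by a single
-- character-level state machine per input string; objective: alternative (same asymptotic cost).

-- s.split(sep) for a nonempty separator (the .getD [] is never hit: split? is none only for sep = "")
def pySplit (s sep : String) : List String := (PySem.Str.split? s sep).getD []

-- ===== PORT A =====
def get_cleaned_ticker_string (selected_ticker : String) (other_ticker : String) : String :=
  let sel := ((pySplit selected_ticker ",").filter (fun t => PySem.Str.strip t != "")).map
      (fun t => PySem.Str.upper (PySem.Str.strip t))
  let oth := ((pySplit other_ticker ",").filter (fun t => PySem.Str.strip t != "")).map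
      (fun t => PySem.Str.upper (PySem.Str.strip t))
  -- for index, ticker in enumerate(other_ticker): each slot is rewritten from its own value only
  let oth := oth.map (fun ticker =>
    let ticker' := PySem.Str.strip ticker
    let ticker_split := (pySplit ticker' " ").map (fun item => PySem.Str.strip item)
    if ticker_split.length == 1 then PySem.Str.upper ticker' ++ " US" else ticker)
  PySem.Str.join ", " (sel ++ oth)

-- ===== PORT B =====
-- Source B's inner loop body: state (out, token, pending); `c.upper()` on one ASCII char is
-- PySem.Chars.upperChar, `' ' not in token` on chars is `!(token.contains ' ')`.
def pvStep (suffix : Bool) (st : List (List Char) × List Char × List Char) (c : Char) :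
    List (List Char) × List Char × List Char :=
  let (out, token, pending) := st
  if c = ',' then
    ((if token.isEmpty then out
      else out ++ [if suffix && !(token.contains ' ') then token ++ (' ' :: 'U' :: 'S' :: []) else token]),
     [], [])
  else if PySem.Chars.isspace c then
    (out, token, if token.isEmpty then pending else pending ++ [c])
  else
    (out, token ++ pending ++ [PySem.Chars.upperChar c], [])

-- `for c in s + ','` with shared accumulator `out`
def pvScan (suffix : Bool) (out : List (List Char)) (s : List Char) : List (List Char) :=
  ((s ++ [',']).foldl (pvStep suffix) (out, [], [])).1

def get_cleaned_ticker_string_alt (selected_ticker : String) (other_ticker : String) : String :=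
  String.ofList (PySem.Chars.join (", ".toList)
    (pvScan true (pvScan false [] selected_ticker.toList) other_ticker.toList))

-- ===== PRECONDITION & SPEC =====
def Spec_get_cleaned_ticker_string (selected_ticker : String) (other_ticker : String) (out : String) : Prop := out = get_cleaned_ticker_string_alt selected_ticker other_ticker
instance (selected_ticker : String) (other_ticker : String) (out : String) : Decidable (Spec_get_cleaned_ticker_string selected_ticker other_ticker out) := by unfold Spec_get_cleaned_ticker_string; infer_instance

-- ===== CLAIM (what is proved, stated in full; the proofs are below) =====
def Claim_equal_get_cleaned_ticker_string : Prop := ∀ (selected_ticker : String) (other_ticker : String), Dom_get_cleaned_ticker_string selected_ticker other_ticker → Spec_get_cleaned_ticker_string selected_ticker other_ticker (get_cleaned_ticker_string selected_ticker other_ticker)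

-- ===== LEMMAS AND PROOFS =====

-- recursive characterization of splitting on one comma character
def pvSplitC (d : Char) : List Char → List (List Char)
  | [] => [[]]
  | c :: l => if c = d then [] :: pvSplitC d l else (pvSplitC d l).modifyHead (c :: ·)

theorem pvSplitC_ne_nil (d : Char) (l : List Char) : pvSplitC d l ≠ [] := by
  induction l with
  | nil => simp [pvSplitC]
  | cons c l ih =>
    simp only [pvSplitC]
    split
    · simp
    · cases h : pvSplitC d l with
      | nil => exact absurd h ih
      | cons a t => simp [List.modifyHead]

theorem pvModifyHead_id {α : Type} (l : List α) : List.modifyHead (fun x => x) l = l := by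
  cases l <;> rfl

theorem pvGo (d : Char) (fuel : Nat) : ∀ (l cur : List Char) (acc : List (List Char)),
    l.length < fuel →
    PySem.Chars.splitOn.go [d] fuel l cur acc
      = acc.reverse ++ (pvSplitC d l).modifyHead (cur.reverse ++ ·) := by
  induction fuel with
  | zero => intro l cur acc h; omega
  | succ n ih =>
    intro l cur acc h
    cases l with
    | nil =>
      rw [PySem.Chars.splitOn.go.eq_def]
      simp [pvSplitC]
    | cons c rest =>
      rw [PySem.Chars.splitOn.go.eq_def]
      simp only [List.isPrefixOf, Bool.and_true]
      by_cases hc : c = d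
      · subst hc
        simp only [beq_self_eq_true, if_pos, List.length_cons] at *
        simp only [List.length_nil, Nat.zero_add, List.drop_succ_cons, List.drop_zero]
        rw [ih rest [] (cur.reverse :: acc) (by simpa using Nat.lt_of_succ_lt_succ h)]
        simp [pvSplitC, pvModifyHead_id]
      · have : (d == c) = false := by simp; exact fun hh => hc hh.symm
        rw [this]
        simp only [Bool.false_eq_true, if_false]
        rw [ih rest (c :: cur) acc (by simpa using Nat.lt_of_succ_lt_succ h)]
        simp only [pvSplitC, if_neg hc]
        obtain ⟨a, t, ht⟩ := List.exists_cons_of_ne_nil (pvSplitC_ne_nil d rest)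
        rw [ht]
        simp [List.modifyHead]

theorem pvSplitOn_eq (d : Char) (l : List Char) :
    PySem.Chars.splitOn l [d] = pvSplitC d l := by
  unfold PySem.Chars.splitOn
  rw [pvGo d (l.length + 1) l [] [] (by omega)]
  obtain ⟨a, t, ht⟩ := List.exists_cons_of_ne_nil (pvSplitC_ne_nil d l)
  rw [ht]; simp [List.modifyHead]

theorem pvSplitC_length_one (d : Char) (l : List Char) :
    ((pvSplitC d l).length = 1) ↔ ¬ (d ∈ l) := by
  induction l with
  | nil => simp [pvSplitC]
  | cons c l ih =>
    simp only [pvSplitC]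
    by_cases hc : c = d
    · subst hc
      obtain ⟨a, t, hat⟩ := List.exists_cons_of_ne_nil (pvSplitC_ne_nil c l)
      simp [hat]
    · simp only [if_neg hc, List.length_modifyHead, List.mem_cons]
      rw [ih]
      constructor
      · intro h hm
        rcases hm with hm | hm
        · exact hc hm.symm
        · exact h hm
      · intro h hm; exact h (Or.inr hm)

-- character facts
theorem pvValid_toNat (n : Nat) (h : n < 55296) : (Char.ofNat n).toNat = n := by
  rw [Char.toNat_ofNat]; simp [Nat.isValidChar]; omega

theorem pvIslower_iff (c : Char) : PySem.Chars.islower c = true ↔ 97 ≤ c.toNat ∧ c.toNat ≤ 122 := by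
  simp [PySem.Chars.islower, Char.le_def]
  exact ⟨fun ⟨a,b⟩ => ⟨a,b⟩, fun ⟨a,b⟩ => ⟨a,b⟩⟩

-- uppercasing never creates or destroys whitespace
theorem pvIsspace_upperChar (c : Char) : PySem.Chars.isspace (PySem.Chars.upperChar c) = PySem.Chars.isspace c := by
  unfold PySem.Chars.upperChar
  split
  · next h =>
    rw [pvIslower_iff] at h
    have hv : (Char.ofNat (c.toNat - 32)).toNat = c.toNat - 32 := pvValid_toNat _ (by omega)
    simp only [PySem.Chars.isspace, hv]
    rw [Bool.eq_iff_iff]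
    simp only [Bool.or_eq_true, Bool.and_eq_true, decide_eq_true_eq]
    omega
  · rfl

theorem pvUpperChar_of_space (c : Char) (h : PySem.Chars.isspace c = true) :
    PySem.Chars.upperChar c = c := by
  unfold PySem.Chars.upperChar
  rw [if_neg]
  intro hl
  rw [pvIslower_iff] at hl
  simp only [PySem.Chars.isspace, Bool.or_eq_true, Bool.and_eq_true, decide_eq_true_eq] at h
  omega

theorem pvUpperChar_eq_space_iff (c : Char) : (PySem.Chars.upperChar c = ' ') ↔ c = ' ' := by
  constructor
  · intro h
    unfold PySem.Chars.upperChar at h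
    by_cases hl : PySem.Chars.islower c = true
    · rw [if_pos hl] at h
      rw [pvIslower_iff] at hl
      have hv : (Char.ofNat (c.toNat - 32)).toNat = c.toNat - 32 := pvValid_toNat _ (by omega)
      have := congrArg Char.toNat h
      rw [hv] at this
      have h32 : (' ' : Char).toNat = 32 := rfl
      rw [h32] at this
      omega
    · rwa [if_neg hl] at h
  · intro h; subst h; rfl

theorem pvUpperChar_idem (c : Char) : PySem.Chars.upperChar (PySem.Chars.upperChar c) = PySem.Chars.upperChar c := by
  unfold PySem.Chars.upperChar
  split
  · next h =>
    rw [pvIslower_iff] at h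
    have hv : (Char.ofNat (c.toNat - 32)).toNat = c.toNat - 32 := pvValid_toNat _ (by omega)
    rw [if_neg]
    rw [pvIslower_iff, hv]
    omega
  · rfl

-- strip / upper interaction (A re-strips and re-uppercases already cleaned tokens)
theorem pvLstrip_map_upper (l : List Char) :
    PySem.Chars.lstrip (List.map PySem.Chars.upperChar l) = List.map PySem.Chars.upperChar (PySem.Chars.lstrip l) := by
  unfold PySem.Chars.lstrip
  have hps : (PySem.Chars.isspace ∘ PySem.Chars.upperChar) = PySem.Chars.isspace := funext pvIsspace_upperChar
  rw [List.dropWhile_map, hps]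

theorem pvRstrip_map_upper (l : List Char) :
    PySem.Chars.rstrip (List.map PySem.Chars.upperChar l) = List.map PySem.Chars.upperChar (PySem.Chars.rstrip l) := by
  unfold PySem.Chars.rstrip
  have hps : (PySem.Chars.isspace ∘ PySem.Chars.upperChar) = PySem.Chars.isspace := funext pvIsspace_upperChar
  rw [← List.map_reverse, List.dropWhile_map, hps, List.map_reverse]

theorem pvStrip_map_upper (l : List Char) :
    PySem.Chars.strip (PySem.Chars.upper l) = PySem.Chars.upper (PySem.Chars.strip l) := by
  unfold PySem.Chars.strip PySem.Chars.upper
  rw [pvLstrip_map_upper, pvRstrip_map_upper]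

theorem pvDropWhile_idem {α : Type} (p : α → Bool) (l : List α) :
    List.dropWhile p (List.dropWhile p l) = List.dropWhile p l := by
  cases h : List.dropWhile p l with
  | nil => rfl
  | cons a t =>
    have hne : List.dropWhile p l ≠ [] := by rw [h]; simp
    have ha : p a = false := by
      have hh := List.head_dropWhile_not p hne
      have : (List.dropWhile p l).head hne = a := by
        revert hne hh
        rw [h]
        intro hne hh
        rfl
      rwa [this] at hh
    exact List.dropWhile_cons_of_neg (by simp [ha])

theorem pvDropWhile_eq_self_of_prefix {α : Type} (p : α → Bool) {l z : List α}
    (hl : List.dropWhile p l = l) (hz : z <+: l) : List.dropWhile p z = z := by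
  cases z with
  | nil => rfl
  | cons a t =>
    obtain ⟨r, hr⟩ := hz
    have ha : p a = false := by
      by_contra hpa
      have hpa' : p a = true := by revert hpa; cases p a <;> simp
      rw [← hr] at hl
      rw [List.cons_append, List.dropWhile_cons_of_pos hpa'] at hl
      have h1 := List.length_dropWhile_le p (t ++ r)
      have h2 := congrArg List.length hl
      simp [List.length_append] at h1 h2
      omega
    exact List.dropWhile_cons_of_neg (by simp [ha])

theorem pvRstrip_prefix (l : List Char) : PySem.Chars.rstrip l <+: l := by
  unfold PySem.Chars.rstrip
  rw [← List.reverse_suffix, List.reverse_reverse]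
  exact List.dropWhile_suffix _

theorem pvStrip_idem (l : List Char) : PySem.Chars.strip (PySem.Chars.strip l) = PySem.Chars.strip l := by
  unfold PySem.Chars.strip
  have hm : PySem.Chars.lstrip (PySem.Chars.lstrip l) = PySem.Chars.lstrip l := by
    unfold PySem.Chars.lstrip; exact pvDropWhile_idem _ _
  have h1 : PySem.Chars.lstrip (PySem.Chars.rstrip (PySem.Chars.lstrip l)) = PySem.Chars.rstrip (PySem.Chars.lstrip l) := by
    unfold PySem.Chars.lstrip at hm ⊢
    exact pvDropWhile_eq_self_of_prefix _ hm (pvRstrip_prefix _)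
  rw [h1]
  unfold PySem.Chars.rstrip
  rw [List.reverse_reverse]
  rw [pvDropWhile_idem]

theorem pvStrip_upper_strip (l : List Char) :
    PySem.Chars.strip (PySem.Chars.upper (PySem.Chars.strip l)) = PySem.Chars.upper (PySem.Chars.strip l) := by
  rw [pvStrip_map_upper, pvStrip_idem]

theorem pvUpper_upper (l : List Char) :
    PySem.Chars.upper (PySem.Chars.upper l) = PySem.Chars.upper l := by
  unfold PySem.Chars.upper
  rw [List.map_map]
  exact List.map_congr_left (fun c _ => pvUpperChar_idem c)

-- whitespace lemmas used by the scanner invariant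
theorem pvLstrip_cons_space (c : Char) (l : List Char) (h : PySem.Chars.isspace c = true) :
    PySem.Chars.strip (c :: l) = PySem.Chars.strip l := by
  unfold PySem.Chars.strip PySem.Chars.lstrip
  rw [List.dropWhile_cons_of_pos h]

theorem pvRstrip_all_space (l : List Char) (h : l.all PySem.Chars.isspace = true) :
    PySem.Chars.rstrip l = [] := by
  unfold PySem.Chars.rstrip
  rw [List.dropWhile_eq_nil_iff.mpr, List.reverse_nil]
  intro x hx
  exact List.all_eq_true.mp h x (List.mem_reverse.mp hx)

theorem pvRstrip_append_cons (xs : List Char) (c : Char) (h : List Char)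
    (hc : ¬ PySem.Chars.isspace c = true) :
    PySem.Chars.rstrip (xs ++ c :: h) = xs ++ c :: PySem.Chars.rstrip h := by
  unfold PySem.Chars.rstrip
  rw [List.reverse_append, List.reverse_cons, List.append_assoc, List.dropWhile_append]
  cases he : (List.dropWhile PySem.Chars.isspace h.reverse).isEmpty
  · simp only [Bool.false_eq_true, if_false]
    simp
  · rw [if_pos rfl]
    rw [List.isEmpty_iff] at he
    rw [he]
    simp [List.dropWhile_cons_of_neg (by simpa using hc)]

theorem pvRstrip_cons (c : Char) (h : List Char) (hc : ¬ PySem.Chars.isspace c = true) :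
    PySem.Chars.rstrip (c :: h) = c :: PySem.Chars.rstrip h := by
  simpa using pvRstrip_append_cons [] c h hc

theorem pvUpper_all_space (l : List Char) (h : l.all PySem.Chars.isspace = true) :
    PySem.Chars.upper l = l := by
  unfold PySem.Chars.upper
  induction l with
  | nil => rfl
  | cons c t ih =>
    simp only [List.all_cons, Bool.and_eq_true] at h
    rw [List.map_cons, pvUpperChar_of_space c h.1, ih h.2]

theorem pvUpper_contains_space (l : List Char) :
    ((PySem.Chars.upper l).contains ' ') = (l.contains ' ') := by
  unfold PySem.Chars.upper
  rw [Bool.eq_iff_iff]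
  simp only [List.contains_eq_mem, decide_eq_true_eq, List.mem_map]
  constructor
  · rintro ⟨c, hc, he⟩
    rwa [(pvUpperChar_eq_space_iff c).mp he] at hc
  · intro hm
    exact ⟨' ', hm, rfl⟩

-- the emitted token for one raw segment / scanner state
def pvTok (suffix : Bool) (t : List Char) : List Char :=
  if suffix && !(t.contains ' ') then t ++ (' ' :: 'U' :: 'S' :: []) else t

def pvEmit (suffix : Bool) (t : List Char) : List (List Char) :=
  if t.isEmpty then [] else [pvTok suffix t]

def pvFirst (token pending h : List Char) : List Char :=
  if token.isEmpty then PySem.Chars.upper (PySem.Chars.strip h)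
  else token ++ PySem.Chars.upper (PySem.Chars.rstrip (pending ++ h))

def pvTail (suffix : Bool) (segs : List (List Char)) : List (List Char) :=
  (segs.filter (fun h => !(PySem.Chars.strip h).isEmpty)).map
    (fun h => pvTok suffix (PySem.Chars.upper (PySem.Chars.strip h)))

theorem pvUpper_isEmpty (l : List Char) : (PySem.Chars.upper l).isEmpty = l.isEmpty := by
  unfold PySem.Chars.upper; cases l <;> simp

theorem pvTail_cons (suffix : Bool) (h : List Char) (t : List (List Char)) :
    pvTail suffix (h :: t)
      = pvEmit suffix (PySem.Chars.upper (PySem.Chars.strip h)) ++ pvTail suffix t := by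
  unfold pvTail pvEmit
  rw [List.filter_cons]
  cases he : (PySem.Chars.strip h).isEmpty
  · simp [pvUpper_isEmpty, he]
  · simp [pvUpper_isEmpty, he]

theorem pvStep_comma (suffix : Bool) (out : List (List Char)) (token pending : List Char) :
    pvStep suffix (out, token, pending) ','
      = ((if token.isEmpty then out else out ++ [pvTok suffix token]), [], []) := by
  simp [pvStep, pvTok]

theorem pvStep_space (suffix : Bool) (out : List (List Char)) (token pending : List Char)
    (c : Char) (hc : ¬ c = ',') (hs : PySem.Chars.isspace c = true) :
    pvStep suffix (out, token, pending) c
      = (out, token, if token.isEmpty then pending else pending ++ [c]) := by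
  simp [pvStep, hc, hs]

theorem pvStep_char (suffix : Bool) (out : List (List Char)) (token pending : List Char)
    (c : Char) (hc : ¬ c = ',') (hs : ¬ PySem.Chars.isspace c = true) :
    pvStep suffix (out, token, pending) c
      = (out, token ++ pending ++ [PySem.Chars.upperChar c], []) := by
  simp [pvStep, hc, hs]

-- the scanner, run from a mid-token state, produces the first (combined) token then A's tail
theorem pvFirst_nil (token pending : List Char) (hp : pending.all PySem.Chars.isspace = true) :
    pvFirst token pending [] = token := by
  unfold pvFirst
  cases htok : token.isEmpty
  · rw [if_neg (by simp)]
    rw [List.append_nil, pvRstrip_all_space pending hp]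
    simp [PySem.Chars.upper]
  · have he : token = [] := by simpa using htok
    subst he
    simp [PySem.Chars.strip, PySem.Chars.lstrip, PySem.Chars.rstrip, PySem.Chars.upper]

theorem pvEmit_out (suffix : Bool) (out : List (List Char)) (token : List Char) :
    (if token.isEmpty then out else out ++ [pvTok suffix token]) = out ++ pvEmit suffix token := by
  unfold pvEmit; cases token.isEmpty <;> simp

theorem pvScan_gen (suffix : Bool) (l : List Char) :
    ∀ (token pending : List Char) (out : List (List Char)),
    pending.all PySem.Chars.isspace = true → (token = [] → pending = []) →
    (l ++ [',']).foldl (pvStep suffix) (out, token, pending)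
      = (out ++ pvEmit suffix (pvFirst token pending (pvSplitC ',' l).headI)
             ++ pvTail suffix (pvSplitC ',' l).tail, [], []) := by
  induction l with
  | nil =>
    intro token pending out hp ht
    simp only [List.nil_append, List.foldl_cons, List.foldl_nil, pvStep_comma]
    rw [show pvSplitC ',' [] = [[]] from rfl]
    simp only [List.headI, List.tail_cons]
    rw [pvFirst_nil token pending hp, pvEmit_out]
    simp [pvTail]
  | cons c l ih =>
    intro token pending out hp ht
    obtain ⟨a, t, hat⟩ := List.exists_cons_of_ne_nil (pvSplitC_ne_nil ',' l)
    simp only [List.cons_append, List.foldl_cons]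
    by_cases hcomma : c = ','
    · subst hcomma
      rw [pvStep_comma, ih [] [] _ (by simp) (fun _ => rfl), hat]
      have hsplit : pvSplitC ',' (',' :: l) = [] :: pvSplitC ',' l := by simp [pvSplitC]
      rw [hsplit, hat]
      simp only [List.headI, List.tail_cons]
      rw [pvFirst_nil token pending hp, pvEmit_out, pvTail_cons]
      have hfa : pvFirst [] [] a = PySem.Chars.upper (PySem.Chars.strip a) := by
        unfold pvFirst; simp
      rw [hfa]
      simp [List.append_assoc]
    · have hsplit : pvSplitC ',' (c :: l) = (c :: a) :: t := by
        simp [pvSplitC, hcomma, hat, List.modifyHead]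
      by_cases hsp : PySem.Chars.isspace c = true
      · rw [pvStep_space suffix out token pending c hcomma hsp, hsplit]
        simp only [List.headI, List.tail_cons]
        cases htok : token.isEmpty
        · simp only [Bool.false_eq_true, if_false]
          rw [ih token (pending ++ [c]) out (by simp [List.all_append, hp, hsp])
              (fun hh => by simp [hh] at htok), hat]
          simp only [List.headI, List.tail_cons]
          have hkey : pvFirst token (pending ++ [c]) a = pvFirst token pending (c :: a) := by
            unfold pvFirst
            rw [if_neg (by simp [htok]), if_neg (by simp [htok])]
            simp
          rw [hkey]
        · have he : token = [] := by simpa using htok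
          subst he
          have hpe : pending = [] := ht rfl
          subst hpe
          simp only [if_true]
          rw [ih [] [] out rfl (fun _ => rfl), hat]
          simp only [List.headI, List.tail_cons]
          have hkey : pvFirst [] [] a = pvFirst [] [] (c :: a) := by
            unfold pvFirst
            simp only [List.isEmpty_nil, if_true]
            rw [pvLstrip_cons_space c a hsp]
          rw [hkey]
      · rw [pvStep_char suffix out token pending c hcomma hsp, hsplit]
        simp only [List.headI, List.tail_cons]
        rw [ih (token ++ pending ++ [PySem.Chars.upperChar c]) [] out rfl
            (by intro hh; simp at hh), hat]
        simp only [List.headI, List.tail_cons]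
        have hkey : pvFirst (token ++ pending ++ [PySem.Chars.upperChar c]) [] a
            = pvFirst token pending (c :: a) := by
          unfold pvFirst
          rw [if_neg (by simp), List.nil_append]
          cases htok : token.isEmpty
          · rw [if_neg (by simp)]
            rw [pvRstrip_append_cons pending c a hsp]
            unfold PySem.Chars.upper
            rw [List.map_append, List.map_cons,
                show List.map PySem.Chars.upperChar pending = pending from pvUpper_all_space pending hp]
            simp
          · have he : token = [] := by simpa using htok
            subst he
            have hpe : pending = [] := ht rfl
            subst hpe
            simp only [if_true, List.nil_append]
            have hs1 : PySem.Chars.strip (c :: a) = c :: PySem.Chars.rstrip a := by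
              unfold PySem.Chars.strip PySem.Chars.lstrip
              rw [List.dropWhile_cons_of_neg (by simpa using hsp)]
              exact pvRstrip_cons c a hsp
            rw [hs1]
            simp [PySem.Chars.upper]
        rw [hkey]

theorem pvScan_eq (suffix : Bool) (out : List (List Char)) (s : List Char) :
    pvScan suffix out s = out ++ pvTail suffix (pvSplitC ',' s) := by
  unfold pvScan
  rw [pvScan_gen suffix s [] [] out rfl (fun _ => rfl)]
  obtain ⟨a, t, hat⟩ := List.exists_cons_of_ne_nil (pvSplitC_ne_nil ',' s)
  rw [hat]
  simp only [List.headI, List.tail_cons]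
  have hfa : pvFirst [] [] a = PySem.Chars.upper (PySem.Chars.strip a) := by
    unfold pvFirst; simp
  rw [hfa, pvTail_cons]
  simp [List.append_assoc]

-- A's string-level pipeline equals pvTail of pvSplitC
theorem pvStrNe (x : String) : (x != "") = !(x.toList.isEmpty) := by
  have hbe : (x == "") = x.toList.isEmpty := by
    rw [Bool.eq_iff_iff]
    simp only [beq_iff_eq, List.isEmpty_iff]
    constructor
    · intro hh; subst hh; rfl
    · intro hh; apply String.toList_inj.mp; simpa using hh
  simp [bne, hbe]

theorem pvSplit_comma (s : String) :
    pySplit s "," = (pvSplitC ',' s.toList).map String.ofList := by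
  unfold pySplit
  rw [PySem.Str.split?]
  have hsep : (",".toList) = [','] := rfl
  rw [hsep, PySem.Chars.split?]
  simp [pvSplitOn_eq]

theorem pvSplit_space_of_list (h : List Char) :
    pySplit (String.ofList h) " " = (pvSplitC ' ' h).map String.ofList := by
  unfold pySplit
  rw [PySem.Str.split?]
  have hsep : (" ".toList) = [' '] := rfl
  rw [hsep, PySem.Chars.split?]
  simp [pvSplitOn_eq]

theorem pvA_base (s : String) :
    ((pySplit s ",").filter (fun t => PySem.Str.strip t != "")).map
        (fun t => PySem.Str.upper (PySem.Str.strip t))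
      = ((pvSplitC ',' s.toList).filter (fun h => !(PySem.Chars.strip h).isEmpty)).map
        (fun h => String.ofList (PySem.Chars.upper (PySem.Chars.strip h))) := by
  rw [pvSplit_comma, List.filter_map]
  have hfil : ∀ h ∈ pvSplitC ',' s.toList,
      ((fun t => PySem.Str.strip t != "") ∘ String.ofList) h
        = (fun h => !(PySem.Chars.strip h).isEmpty) h := by
    intro h _
    simp only [Function.comp]
    rw [pvStrNe]
    congr 1
    simp
  rw [List.filter_congr hfil, List.map_map]
  apply List.map_congr_left
  intro h _
  show PySem.Str.upper (PySem.Str.strip (String.ofList h))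
      = String.ofList (PySem.Chars.upper (PySem.Chars.strip h))
  apply String.toList_inj.mp
  simp

theorem pvA_sel (s : String) :
    (((pySplit s ",").filter (fun t => PySem.Str.strip t != "")).map
        (fun t => PySem.Str.upper (PySem.Str.strip t))).map String.toList
      = pvTail false (pvSplitC ',' s.toList) := by
  rw [pvA_base, List.map_map]
  unfold pvTail
  apply List.map_congr_left
  intro h _
  simp [pvTok]

theorem pvA_oth (o : String) :
    ((((pySplit o ",").filter (fun t => PySem.Str.strip t != "")).map
        (fun t => PySem.Str.upper (PySem.Str.strip t))).map (fun ticker =>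
      let ticker' := PySem.Str.strip ticker
      let ticker_split := (pySplit ticker' " ").map (fun item => PySem.Str.strip item)
      if ticker_split.length == 1 then PySem.Str.upper ticker' ++ " US" else ticker)).map
        String.toList
      = pvTail true (pvSplitC ',' o.toList) := by
  rw [pvA_base, List.map_map, List.map_map]
  unfold pvTail
  apply List.map_congr_left
  intro h _
  simp only [Function.comp]
  -- A re-strips the cleaned token; it is already stripped and uppercased
  have hstr : PySem.Str.strip (String.ofList (PySem.Chars.upper (PySem.Chars.strip h)))
      = String.ofList (PySem.Chars.upper (PySem.Chars.strip h)) := by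
    apply String.toList_inj.mp
    simp [pvStrip_upper_strip]
  rw [hstr, pvSplit_space_of_list, List.map_map, List.length_map]
  have hlen : ((pvSplitC ' ' (PySem.Chars.upper (PySem.Chars.strip h))).length == 1)
      = !((PySem.Chars.upper (PySem.Chars.strip h)).contains ' ') := by
    rw [Bool.eq_iff_iff]
    simp only [beq_iff_eq, Bool.not_eq_true', List.contains_eq_mem, decide_eq_false_iff_not]
    exact pvSplitC_length_one ' ' _
  rw [hlen, pvUpper_contains_space]
  unfold pvTok
  cases hc : (PySem.Chars.strip h).contains ' '
  · simp only [Bool.not_false, if_pos, Bool.true_and]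
    rw [if_pos (by rw [pvUpper_contains_space, hc]; rfl)]
    have hupper : PySem.Str.upper (String.ofList (PySem.Chars.upper (PySem.Chars.strip h)))
        = String.ofList (PySem.Chars.upper (PySem.Chars.strip h)) := by
      apply String.toList_inj.mp
      simp [pvUpper_upper]
    rw [hupper]
    simp
  · simp only [Bool.not_true, Bool.false_eq_true, if_false]
    rw [if_neg (by rw [pvUpper_contains_space, hc]; simp)]
    simp

theorem pvMain (s o : String) :
    get_cleaned_ticker_string s o = get_cleaned_ticker_string_alt s o := by
  unfold get_cleaned_ticker_string get_cleaned_ticker_string_alt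
  rw [PySem.Str.join]
  rw [pvScan_eq, pvScan_eq, List.nil_append]
  congr 1
  rw [List.map_append, pvA_sel s, pvA_oth o]

-- ===== VERDICT (by name: the statement is the Claim_ definition above) =====
theorem get_cleaned_ticker_string_spec : Claim_equal_get_cleaned_ticker_string := by
  intro s o _
  unfold Spec_get_cleaned_ticker_string
  exact pvMain s o
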